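-- pv_equiv track=rewrite | github.com/Hwan0518/Algorithm | 백준/Gold/2504. 괄호의 값/괄호의 값.py | solution
-- ===== SOURCE A (Python) =====
-- def solution(string):
--     result = 0
--     cur_calc = 1
--     stack = []
--     # stack쌓기
--     for i in range(len(string)):
--         s = string[i]
--         # (나 [인 경우
--         if s == '(':
--             cur_calc *= 2
--             stack.append(s)
--         elif s == '[':
--             cur_calc *= 3
--             stack.append(s)
--         # ),]의 경우
--         elif s == ')':
--             # stack이 비어있거나, 짝이 맞지 않은 경우
--             if not stack or stack[-1] != '(':
--                 return 0
--             # 올바른 경우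
--             if string[i-1] == '(':
--                 result += cur_calc
--             cur_calc //= 2
--             stack.pop()
--         else:
--             # stack이 비어있거나, 짝이 맞지 않은 경우
--             if not stack or stack[-1] != '[':
--                 return 0
--             # 올바른 경우
--             if string[i-1] == '[':
--                 result += cur_calc
--             cur_calc //= 3
--             stack.pop()
--
--     return result if not stack else 0
-- ===== SOURCE B (Python) =====
-- def solution(string):
--     stack = []
--     for ch in string:
--         if ch == '(' or ch == '[':
--             stack.append(ch)
--         else:
--             mult, opener = (2, '(') if ch == ')' else (3, '[')
--             total = 0
--             while stack and isinstance(stack[-1], int):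
--                 total += stack.pop()
--             if not stack or stack[-1] != opener:
--                 return 0
--             stack.pop()
--             stack.append(mult * (total if total > 0 else 1))
--     if any(isinstance(e, str) for e in stack):
--         return 0
--     return sum(stack)
-- ===== Notes on version B (the rewrite author's own statement) =====
-- stated objective: alternative
-- what changed: Replaces A's scalar running multiplier with previous-character adjacency test by a value-stack evaluator that pushes opener markers and partial sums, summing values above the matching marker on each close.
import Mathlib
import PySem

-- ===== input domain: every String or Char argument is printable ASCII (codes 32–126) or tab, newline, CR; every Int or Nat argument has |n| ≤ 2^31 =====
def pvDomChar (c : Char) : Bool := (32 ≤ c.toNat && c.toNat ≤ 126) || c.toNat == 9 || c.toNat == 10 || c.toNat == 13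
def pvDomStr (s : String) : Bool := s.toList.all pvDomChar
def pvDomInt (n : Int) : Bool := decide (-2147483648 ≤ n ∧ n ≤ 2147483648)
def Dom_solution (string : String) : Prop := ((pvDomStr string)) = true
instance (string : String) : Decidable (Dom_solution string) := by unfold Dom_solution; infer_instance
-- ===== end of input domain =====

-- B replaces A's scalar running multiplier + previous-character adjacency test by a
-- value-stack evaluator that keeps partial sums on the stack (objective: alternative).

-- ===== PORT A =====
-- A's index loop with early returns, ported as index recursion; the stack's top is
-- kept at the list head (append / stack[-1] / pop become cons / head / tail).
def solutionIdx (string : String) (n : Nat) (i : Nat) (result cur : Int) (stack : List Char) : Int :=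
  if _h : i < n then
    match PySem.Str.pyGet? string (i : Int) with
    | none => 0   -- unreachable: i < len(string), so string[i] never raises
    | some s =>
      if s = '(' then solutionIdx string n (i+1) result (cur * 2) (s :: stack)
      else if s = '[' then solutionIdx string n (i+1) result (cur * 3) (s :: stack)
      else if s = ')' then
        match stack with
        | [] => 0
        | t :: rest =>
          if t ≠ '(' then 0
          else
            solutionIdx string n (i+1)
              (if PySem.Str.pyGet? string ((i : Int) - 1) = some '(' then result + cur else result)
              (PySem.Int.floordiv cur 2) rest
      else
        match stack with
        | [] => 0
        | t :: rest =>
          if t ≠ '[' then 0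
          else
            solutionIdx string n (i+1)
              (if PySem.Str.pyGet? string ((i : Int) - 1) = some '[' then result + cur else result)
              (PySem.Int.floordiv cur 3) rest
  else if stack = [] then result else 0
termination_by n - i

def solution (string : String) : Int :=
  solutionIdx string (PySem.Str.len string).toNat 0 0 1 []

-- ===== PORT B =====
-- B's stack holds opener markers and partial integer sums.
inductive Entry
  | op  : Char → Entry
  | val : Int → Entry
deriving DecidableEq, Repr

def Entry.isOpen : Entry → Bool
  | .op _ => true
  | .val _ => false

def Entry.toInt : Entry → Int
  | .op _ => 0
  | .val v => v

-- 'while stack and isinstance(stack[-1], int): total += stack.pop()'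
def popVals : List Entry → Int × List Entry
  | [] => (0, [])
  | .val v :: t => let p := popVals t; (v + p.1, p.2)
  | .op c :: t => (0, .op c :: t)

-- final loop of B: 0 if an opener is left, else the sum of the entries
def finalSum (st : List Entry) : Int :=
  if st.any Entry.isOpen then 0 else (st.map Entry.toInt).sum

def bLoop : List Char → List Entry → Int
  | [], st => finalSum st
  | c :: rest, st =>
    if c = '(' ∨ c = '[' then bLoop rest (.op c :: st)
    else
      let mult : Int := if c = ')' then 2 else 3
      let opener : Char := if c = ')' then '(' else '['
      let p := popVals st
      match p.2 with
      | .op o :: st' =>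
          if o = opener then bLoop rest (.val (mult * (if p.1 > 0 then p.1 else 1)) :: st') else 0
      | _ => 0

def solution_alt (string : String) : Int := bLoop string.toList []

-- ===== PRECONDITION & SPEC =====
def Spec_solution (string : String) (out : Int) : Prop := out = solution_alt string
instance (string : String) (out : Int) : Decidable (Spec_solution string out) := by unfold Spec_solution; infer_instance

-- ===== CLAIM (what is proved, stated in full; the proofs are below) =====
def Claim_equal_solution : Prop := ∀ (string : String), Dom_solution string → Spec_solution string (solution string)

-- ===== LEMMAS AND PROOFS =====

-- A's loop rewritten over the character list, carrying the previous character explicitly.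
def aLoopL (prev : Option Char) : List Char → Int → Int → List Char → Int
  | [], result, _, stack => if stack = [] then result else 0
  | c :: rest, result, cur, stack =>
    if c = '(' then aLoopL (some c) rest result (cur * 2) (c :: stack)
    else if c = '[' then aLoopL (some c) rest result (cur * 3) (c :: stack)
    else if c = ')' then
      match stack with
      | [] => 0
      | t :: stack' =>
        if t ≠ '(' then 0
        else aLoopL (some c) rest (if prev = some '(' then result + cur else result)
               (PySem.Int.floordiv cur 2) stack'
    else
      match stack with
      | [] => 0
      | t :: stack' =>
        if t ≠ '[' then 0
        else aLoopL (some c) rest (if prev = some '[' then result + cur else result)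
               (PySem.Int.floordiv cur 3) stack'

-- markers of B's stack, top first
def markers : List Entry → List Char
  | [] => []
  | .op c :: t => c :: markers t
  | .val _ :: t => markers t

-- the running multiplier A keeps for a given stack of openers
def mlt : List Char → Int
  | [] => 1
  | c :: t => (if c = '(' then 2 else 3) * mlt t

-- A's accumulated result, read off B's stack
def wsum : List Entry → Int
  | [] => 0
  | .op _ :: t => wsum t
  | .val v :: t => v * mlt (markers t) + wsum t

def valsPos (st : List Entry) : Prop := ∀ v : Int, Entry.val v ∈ st → 0 < v

-- what the previous character says about B's stack top
def prevOK : Option Char → List Entry → Prop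
  | none, st => st = []
  | some c, st =>
    if c = '(' ∨ c = '[' then ∃ t, st = .op c :: t
    else ∃ v t, st = .val v :: t ∧ 0 < v

lemma fdiv_mul_cancel (k m : Int) (hk : 0 < k) : PySem.Int.floordiv (k * m) k = m := by
  rw [PySem.Int.floordiv_eq_ediv_of_pos hk, Int.mul_ediv_cancel_left _ (by omega)]

lemma popVals_nonneg (st : List Entry) (h : valsPos st) : 0 ≤ (popVals st).1 := by
  induction st with
  | nil => simp [popVals]
  | cons e t ih =>
    cases e with
    | op c => simp [popVals]
    | val v =>
      have hv := h v (by simp)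
      have ht : valsPos t := fun w hw => h w (by simp [hw])
      simp only [popVals]
      have := ih ht
      omega

lemma popVals_markers (st : List Entry) : markers (popVals st).2 = markers st := by
  induction st with
  | nil => rfl
  | cons e t ih =>
    cases e with
    | op c => rfl
    | val v => simpa [popVals, markers] using ih

lemma popVals_shape (st : List Entry) :
    (popVals st).2 = [] ∨ ∃ c t, (popVals st).2 = .op c :: t := by
  induction st with
  | nil => left; rfl
  | cons e t ih =>
    cases e with
    | op c => right; exact ⟨c, t, rfl⟩
    | val v => simpa [popVals] using ih

lemma popVals_valsPos (st : List Entry) (h : valsPos st) : valsPos (popVals st).2 := by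
  induction st with
  | nil => simpa [popVals] using h
  | cons e t ih =>
    cases e with
    | op c => simpa [popVals] using h
    | val v => exact (by simpa [popVals] using ih (fun w hw => h w (by simp [hw])))

lemma wsum_popVals (st : List Entry) :
    wsum st = (popVals st).1 * mlt (markers st) + wsum (popVals st).2 := by
  induction st with
  | nil => simp [popVals, wsum]
  | cons e t ih =>
    cases e with
    | op c => simp [popVals, wsum]
    | val v =>
      simp only [popVals, wsum, markers]
      rw [ih]
      ring

lemma wsum_no_markers (st : List Entry) (h : markers st = []) :
    wsum st = (st.map Entry.toInt).sum := by
  induction st with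
  | nil => rfl
  | cons e t ih =>
    cases e with
    | op c => simp [markers] at h
    | val v =>
      simp only [markers] at h
      simp [wsum, Entry.toInt, h, mlt, ih h]

lemma any_isOpen_iff (st : List Entry) : st.any Entry.isOpen = false ↔ markers st = [] := by
  induction st with
  | nil => simp [markers]
  | cons e t ih =>
    cases e with
    | op c => simp [markers, Entry.isOpen]
    | val v => simpa [markers, Entry.isOpen] using ih

-- small helpers about valsPos
lemma valsPos_tail (e : Entry) (t : List Entry) (h : valsPos (e :: t)) : valsPos t :=
  fun w hw => h w (List.mem_cons_of_mem _ hw)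

lemma valsPos_cons_val (w : Int) (t : List Entry) (hw : 0 < w) (ht : valsPos t) :
    valsPos (.val w :: t) := by
  intro v hv
  rcases List.mem_cons.1 hv with h | h
  · injection h with h; omega
  · exact ht v h

-- the main invariant-preservation lemma
lemma main_equiv (cs : List Char) : ∀ (prev : Option Char) (st : List Entry),
    prevOK prev st → valsPos st →
    aLoopL prev cs (wsum st) (mlt (markers st)) (markers st) = bLoop cs st := by
  induction cs with
  | nil =>
    intro prev st _ _
    simp only [aLoopL, bLoop, finalSum]
    rcases h : st.any Entry.isOpen with _ | _
    · rw [if_pos ((any_isOpen_iff st).1 h), if_neg (by simp [h]),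
        wsum_no_markers st ((any_isOpen_iff st).1 h)]
    · rw [if_neg (by intro hm; rw [← (any_isOpen_iff st)] at hm; simp [h] at hm), if_pos (by simp [h])]
  | cons c rest ih =>
    intro prev st hprev hpos
    by_cases hop : c = '(' ∨ c = '['
    · -- opener: both push
      have hb : bLoop (c :: rest) st = bLoop rest (.op c :: st) := by
        simp only [bLoop, if_pos hop]
      rw [hb]
      have := ih (some c) (.op c :: st) (by simp [prevOK, hop])
        (fun v hv => hpos v (by
          rcases List.mem_cons.1 hv with h | h
          · exact absurd h (by simp)
          · exact h))
      rcases hop with h | h <;> subst h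
      · simpa only [aLoopL, if_pos rfl, markers, mlt, wsum, mul_comm] using this
      · simpa only [aLoopL, if_neg (by decide : ¬('[' = '(')), if_pos rfl, markers, mlt, wsum,
          mul_comm] using this
    · -- closer (or quirk character, taken through the closing-bracket path)
      obtain ⟨hc1, hc2⟩ := not_or.mp hop
      cases prev with
      | none =>
        have hst : st = [] := hprev
        subst hst
        simp only [aLoopL, bLoop, popVals, markers, if_neg hc1, if_neg hc2]
        split <;> (try split) <;> simp_all
      | some p =>
        by_cases hpop : p = '(' ∨ p = '['
        · -- previous char pushed a marker: popVals pops nothing, total = 0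
          obtain ⟨t, hst⟩ : ∃ t, st = .op p :: t := by
            simpa [prevOK, if_pos hpop] using hprev
          subst hst
          have hmk : markers (Entry.op p :: t) = p :: markers t := rfl
          have hpv : popVals (Entry.op p :: t) = (0, Entry.op p :: t) := rfl
          have hvt : valsPos t := valsPos_tail _ _ hpos
          by_cases hcp : c = ')'
          · subst hcp
            rcases hpop with hpeq | hpeq <;> subst hpeq
            · -- p = open paren: a correct empty pair
              simp only [aLoopL, bLoop, hpv, hmk, Char.reduceEq, ne_eq, not_false_iff,
                if_true, if_false, not_true, Option.some.injEq, or_self, or_false, false_or,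
                if_neg (show ¬ ((0:Int) > 0) by omega), mul_one]
              rw [← ih (some ')') (.val 2 :: t) ⟨2, t, rfl, by omega⟩
                (valsPos_cons_val 2 t (by omega) hvt)]
              simp only [markers, wsum, mlt, Char.reduceEq, if_true, if_false]
              rw [fdiv_mul_cancel 2 (mlt (markers t)) (by omega)]
              ring_nf
            · -- p = open bracket: mismatch, both return 0
              simp only [aLoopL, bLoop, hpv, hmk, Char.reduceEq, ne_eq, not_false_iff,
                if_true, if_false, not_true, Option.some.injEq, or_self, or_false, false_or]
          · -- closing-bracket path (c is the bracket or any other non-bracket character)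
            rcases hpop with hpeq | hpeq <;> subst hpeq
            · -- p = open paren: mismatch, both return 0
              simp only [aLoopL, bLoop, hpv, hmk, Char.reduceEq, ne_eq, not_false_iff,
                if_true, if_false, not_true, Option.some.injEq,
                if_neg hc1, if_neg hc2, if_neg hcp, if_neg (show ¬(c = '(' ∨ c = '[') by tauto),
                or_self, or_false, false_or]
            · -- p = open bracket: a correct empty pair
              simp only [aLoopL, bLoop, hpv, hmk, Char.reduceEq, ne_eq, not_false_iff,
                if_true, if_false, not_true, Option.some.injEq,
                if_neg hc1, if_neg hc2, if_neg hcp, if_neg (show ¬(c = '(' ∨ c = '[') by tauto),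
                or_self, or_false, false_or, if_neg (show ¬ ((0:Int) > 0) by omega), mul_one]
              rw [← ih (some c) (.val 3 :: t)
                (by simp only [prevOK, if_neg (show ¬(c = '(' ∨ c = '[') by tauto)]
                    exact ⟨3, t, rfl, by omega⟩)
                (valsPos_cons_val 3 t (by omega) hvt)]
              simp only [markers, wsum, mlt, Char.reduceEq, if_true, if_false]
              rw [fdiv_mul_cancel 3 (mlt (markers t)) (by omega)]
              ring_nf
        · -- previous char pushed a value: popVals collects a positive total
          obtain ⟨v, t, hst, hv⟩ : ∃ v t, st = .val v :: t ∧ 0 < v := by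
            simpa [prevOK, if_neg hpop] using hprev
          subst hst
          have hpos_t : valsPos t := valsPos_tail _ _ hpos
          have htot : 0 < (popVals (Entry.val v :: t)).1 := by
            have := popVals_nonneg t hpos_t
            simp only [popVals]; omega
          have hmk := popVals_markers (Entry.val v :: t)
          have hws := wsum_popVals (Entry.val v :: t)
          have hvp := popVals_valsPos (Entry.val v :: t) hpos
          have hp1 : ¬ (some p = some '(') := by
            intro h; exact hpop (Or.inl (by injection h))
          have hp2 : ¬ (some p = some '[') := by
            intro h; exact hpop (Or.inr (by injection h))
          rcases popVals_shape (Entry.val v :: t) with hsh | ⟨o, t₂, hsh⟩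
          · -- no marker anywhere below: A's stack is empty, both return 0
            have hm0 : markers (Entry.val v :: t) = [] := by rw [← hmk, hsh]; rfl
            simp only [aLoopL, bLoop, hm0, hsh, if_neg hc1, if_neg hc2,
              if_neg (show ¬(c = '(' ∨ c = '[') by tauto)]
            split <;> rfl
          · have hmm : markers (Entry.val v :: t) = o :: markers t₂ := by
              rw [← hmk, hsh]; rfl
            have hwt : wsum (popVals (Entry.val v :: t)).2 = wsum t₂ := by rw [hsh]; rfl
            rw [hsh] at hvp
            have hvp₂ : valsPos t₂ := valsPos_tail _ _ hvp
            by_cases hcp : c = ')'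
            · subst hcp
              by_cases ho : o = '('
              · subst ho
                simp only [aLoopL, bLoop, hmm, hsh, Char.reduceEq, ne_eq, not_false_iff,
                  if_true, if_false, not_true, or_self, or_false, false_or,
                  if_neg hp1, if_pos htot]
                rw [← ih (some ')') (.val (2 * (popVals (Entry.val v :: t)).1) :: t₂)
                  ⟨2 * (popVals (Entry.val v :: t)).1, t₂, rfl, by positivity⟩
                  (valsPos_cons_val _ t₂ (by positivity) hvp₂)]
                simp only [markers, wsum, mlt, Char.reduceEq, if_true, if_false]
                rw [fdiv_mul_cancel 2 (mlt (markers t₂)) (by omega)]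
                have h0 := hws
                rw [hmm, hwt] at h0
                simp only [wsum, mlt, markers, Char.reduceEq, if_true, if_false] at h0
                rw [h0]
                ring_nf
              · simp only [aLoopL, bLoop, hmm, hsh, Char.reduceEq, ne_eq, not_false_iff,
                  if_true, if_false, not_true, or_self, or_false, false_or,
                  if_pos (show o ≠ '(' from ho), if_neg (show ¬ (o = '(') from ho)]
            · by_cases ho : o = '['
              · subst ho
                simp only [aLoopL, bLoop, hmm, hsh, Char.reduceEq, ne_eq, not_false_iff,
                  if_true, if_false, not_true, if_neg hc1, if_neg hc2, if_neg hcp,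
                  if_neg (show ¬(c = '(' ∨ c = '[') by tauto), or_self, or_false, false_or,
                  if_neg hp2, if_pos htot]
                rw [← ih (some c) (.val (3 * (popVals (Entry.val v :: t)).1) :: t₂)
                  (by simp only [prevOK, if_neg (show ¬(c = '(' ∨ c = '[') by tauto)]
                      exact ⟨3 * (popVals (Entry.val v :: t)).1, t₂, rfl, by positivity⟩)
                  (valsPos_cons_val _ t₂ (by positivity) hvp₂)]
                simp only [markers, wsum, mlt, Char.reduceEq, if_true, if_false]
                rw [fdiv_mul_cancel 3 (mlt (markers t₂)) (by omega)]
                have h0 := hws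
                rw [hmm, hwt] at h0
                simp only [wsum, mlt, markers, Char.reduceEq, if_true, if_false] at h0
                rw [h0]
                ring_nf
              · simp only [aLoopL, bLoop, hmm, hsh, Char.reduceEq, ne_eq, not_false_iff,
                  if_true, if_false, not_true, if_neg hc1, if_neg hc2, if_neg hcp,
                  if_neg (show ¬(c = '(' ∨ c = '[') by tauto),
                  or_self, or_false, false_or,
                  if_pos (show o ≠ '[' from ho), if_neg (show ¬ (o = '[') from ho)]

-- the index loop of port A equals the list-with-previous-character loop
lemma idx_eq_list (string : String) : ∀ (k i : Nat) (result cur : Int) (stack : List Char),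
    string.toList.length - i = k → (i = 0 → stack = []) →
    solutionIdx string string.toList.length i result cur stack =
      aLoopL (if i = 0 then none else string.toList[i-1]?) (string.toList.drop i) result cur stack := by
  intro k
  induction k with
  | zero =>
    intro i result cur stack hk h0
    have hge : string.toList.length ≤ i := by omega
    rw [solutionIdx.eq_def, dif_neg (by omega), List.drop_eq_nil_of_le hge]
    simp only [aLoopL]
  | succ k ihk =>
    intro i result cur stack hk h0
    have hlt : i < string.toList.length := by omega
    have hget : PySem.Str.pyGet? string (i : Int) = some (string.toList[i]) := by
      rw [PySem.Str.pyGet?_natCast]; exact List.getElem?_eq_getElem hlt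
    have hprev : ∀ j : Int, j = (i : Int) - 1 → i ≠ 0 →
        PySem.Str.pyGet? string j = string.toList[i-1]? := by
      intro j hj hne
      have : j = ((i - 1 : Nat) : Int) := by omega
      rw [this, PySem.Str.pyGet?_natCast]
    have hsucc : (if i + 1 = 0 then none else string.toList[(i+1)-1]?) = some string.toList[i] := by
      simp [List.getElem?_eq_getElem hlt]
    rw [solutionIdx.eq_def, dif_pos hlt, hget, List.drop_eq_getElem_cons hlt]
    simp only [aLoopL]
    by_cases h1 : string.toList[i] = '('
    · rw [if_pos h1, if_pos h1, ihk (i+1) _ _ _ (by omega) (by omega), hsucc, h1]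
    · rw [if_neg h1, if_neg h1]
      by_cases h2 : string.toList[i] = '['
      · rw [if_pos h2, if_pos h2, ihk (i+1) _ _ _ (by omega) (by omega), hsucc, h2]
      · rw [if_neg h2, if_neg h2]
        by_cases h3 : string.toList[i] = ')'
        · rw [if_pos h3, if_pos h3]
          rcases stack with _ | ⟨t, rest⟩
          · rfl
          · have hne : i ≠ 0 := fun h => List.cons_ne_nil _ _ (h0 h)
            simp only []
            by_cases ht : t = '('
            · rw [if_neg (show ¬ (t ≠ '(') by simpa using ht),
                hprev ((i:Int)-1) rfl hne, if_neg hne,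
                ihk (i+1) _ _ _ (by omega) (by omega), hsucc,
                if_neg (show ¬ (t ≠ '(') by simpa using ht)]
            · rw [if_pos (show t ≠ '(' from ht), if_pos (show t ≠ '(' from ht)]
        · rw [if_neg h3, if_neg h3]
          rcases stack with _ | ⟨t, rest⟩
          · rfl
          · have hne : i ≠ 0 := fun h => List.cons_ne_nil _ _ (h0 h)
            simp only []
            by_cases ht : t = '['
            · rw [if_neg (show ¬ (t ≠ '[') by simpa using ht),
                hprev ((i:Int)-1) rfl hne, if_neg hne,
                ihk (i+1) _ _ _ (by omega) (by omega), hsucc,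
                if_neg (show ¬ (t ≠ '[') by simpa using ht)]
            · rw [if_pos (show t ≠ '[' from ht), if_pos (show t ≠ '[' from ht)]

-- ===== VERDICT (by name: the statement is the Claim_ definition above) =====
theorem solution_spec : Claim_equal_solution := by
  unfold Claim_equal_solution Spec_solution
  intro s _
  unfold solution solution_alt
  have hlen : (PySem.Str.len s).toNat = s.toList.length := by
    simp [PySem.Str.len_eq]
  rw [hlen, idx_eq_list s (s.toList.length - 0) 0 0 1 [] rfl (fun _ => rfl)]
  have := main_equiv s.toList none [] rfl (fun v hv => absurd hv (by simp))
  simpa [wsum, mlt, markers] using this
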